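/- GENERATED by mk_final_copies.py from the proof of the farm's unit `start_decoder.F7` (farm:start_decoder.F7.2: Proof.lean) as the
   re-elaboration sweep compiled it — do not edit. -/
import Asan.CheckWalk
import Vorbis.Spec.Units.start_decoder_F7
import Vorbis.Spec.Worked.start_decoder_F7_Lemmas

open X86 X86.User Asan Vorbis Vorbis.Spec Vorbis.Spec.StartDecoder

set_option maxRecDepth 4000
set_option maxHeartbeats 4000000

namespace Vorbis.Spec.start_decoder_F7

/-- The unit's lemmas live in `Lemmas.lean` (same namespace): the windows the segment may write (`Win`), what it keeps of its entry
assertion (`Keep`, `keep_of`), the exit assertion (`exit_body`), one iteration of loop 4026 (`nb_step`, `post_conv`). This marker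
records which segment they serve. -/
theorem unit_marker : pc_F7 = Vorbis.L.start_decoder.cut227 := rfl

end Vorbis.Spec.start_decoder_F7

/-- **Segment `start_decoder.F7`** (0x115842 – 0x1158f3, stb_vorbis_fixed.c 4026 – 4033, 3966 `++i`): the neighbors loop, then
`longest_floorlist = max(longest_floorlist, g->values)`, `++i`, back to the head 0x11526a of loop 3966.

THE LOOP (head 0x115848, `for (j = 2; j < g->values; ++j)`). Invariant at the head, `s` the state, `v` the segment's entry state:
`r12 = j`, `2 ≤ j ≤ values`; FL10 for the entries below `j` (`NbUpTo s.mem G j`); the memory differs from `v.mem` only in the callee's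
stack `[R − 128, R)`, the frame objects `low` / `hi` and the `neighbors` array of the element (`hsame`); no shadow byte written
(`hun`); `rsp`, `rbx = g`, `rbp = f`; DF and the MXCSR masks. Measure `values − j`. Everything else of the entry assertion is NOT
carried through the loop: it is rebuilt once, at the exit, from `hsame` (`keep_of`, `exit_body`).
One iteration: `low = hi = 0`, `neighbors(g->Xlist, j, &low, &hi)`, the two checked byte stores; FL10 for `j` is `nb_step` (XL and the
callee's post). The exit (`values ≤ j`) is walked on through both arms of `if (g->values > longest_floorlist)` (`hexit`). -/
theorem Vorbis.Spec.Worked.start_decoder_F7_ok : Vorbis.Spec.start_decoder_F7.Statement := by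
  intro Lay hLay μ hμ u₀ hcode h_nb hstore1 g i v hat
  -- 1. the entry assertion `AtF7` and its fields; the carried `AtEntry` (about the function's entry state `g.e`)
  obtain ⟨A5, A, mc, n, hb⟩ := hat
  have hb0 := hb
  obtain ⟨hloop, hrbx, hcur, hsorted⟩ := hb
  obtain ⟨hfr, hhand, hmid, hrbp, hcnt, hile, hfloors, hlfl⟩ := hloop
  have he := hfr.entry
  v_entry he
  simp only [depth] at he_room
  simp only [depth, UInt64.reduceOfNat, Nat.reduceAdd] at he_stack
  clear he_rip he_eq he_df he_mx he_sse he_code he_inv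
  -- the present state under the walker's names; `rsp = R = RA − 1480` spelled over the entry state's rsp
  have w_rip := hfr.rip
  have w_rsp : v.reg .rsp = g.e.reg .rsp - 1480 := by
    rw [hfr.rsp]
    apply UInt64.toNat_inj.mp
    unfold Ghost.R Ghost.RA steady
    rw [toNat_addr _ (by omega)]
    u_omega
  have hv_rsp := w_rsp
  -- `G` = the floor element under construction, as a number; where it is (one arithmetic fact each)
  obtain ⟨G, hG⟩ : ∃ G : Nat, floorAt g v.mem i = G := ⟨_, rfl⟩
  rw [hG] at hrbx hsorted
  have hGw := Vorbis.Spec.start_decoder_F7.elem_where hmid.arena hhand hfloors.toFloorShape hcur.base.base.lt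
  have hG' : stb_vorbis.floor_config_at v.mem g.f i = G := hG
  rw [hG'] at hGw
  obtain ⟨gw1, gw2, gw3, gw4, gw5, gw6, gw7⟩ := hGw
  have hGlo : 0x119d40 ≤ G := gw1
  have hGhi : G + 1596 ≤ 0xC00000 := by omega
  have hGst : G + 1596 ≤ 0x700000 ∨ 0x800000 ≤ G := by omega
  have hGb1 : (floorBlock v.mem g.f).base ≤ G := gw2
  have hGb2 : G + 1596 ≤ (floorBlock v.mem g.f).base + (floorBlock v.mem g.f).size := gw3
  clear gw1 gw2 gw3 gw4 gw5 gw6 gw7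
  -- `values` of the element, as a number
  have hvb := Vorbis.Spec.start_decoder_F7.values_bounds6 hcur hG
  obtain ⟨V, hV⟩ : ∃ V : Nat, v.mem.u32 (G + 1592) = V := ⟨_, rfl⟩
  have hVi : Floor1.values v.mem G = sint32 V := by
    rw [← hV]
    simp only [vacc, voff]
    rfl
  have hV2 : 2 ≤ V ∧ V ≤ 250 ∧ Floor1.values v.mem G = (V : Int) := by
    have hc := sint32_cases V
    have hlt : V < 2 ^ 32 := by
      rw [← hV]
      exact Mem.u32_lt _ _
    omega
  -- the slot of `longest_floorlist`, as a number
  obtain ⟨Lo, hLo⟩ : ∃ Lo : Nat, v.mem.u32 (g.R + 0x28) = Lo := ⟨_, rfl⟩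
  have hLo2 : Lo ≤ 250 ∧ v.mem.i32 (g.R + 0x28) = (Lo : Int) := by
    have h1 := hlfl.lo
    have h2 := hlfl.hi
    have e : v.mem.i32 (g.R + 0x28) = sint32 Lo := by
      rw [← hLo]
      rfl
    have hc := sint32_cases Lo
    have hlt : Lo < 2 ^ 32 := by
      rw [← hLo]
      exact Mem.u32_lt _ _
    omega
  have hV2n : 2 ≤ V ∧ V ≤ 250 := ⟨hV2.1, hV2.2.1⟩
  have hLon : Lo ≤ 250 := hLo2.1
  have hV2i : Floor1.values v.mem G = (V : Int) := hV2.2.2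
  have hLo2i : v.mem.i32 (g.R + 0x28) = (Lo : Int) := hLo2.2
  clear hVi hvb hV2 hLo2
  have hGa : (addr G).toNat = G := toNat_addr _ (by omega)
  -- every byte of the element is a check site
  have hsite : ∀ off : Nat, off + 1 ≤ 1596 → Site (Live (stackObjs g.frames' ++ A.2)) (G + off) 1 := by
    intro off hoff
    have hsh : FloorShape (g.Blk A) v.mem g.f := hfloors.toFloorShape.reblk (fun hB => runBlk_setup hB.blk)
    exact hsh.site_elem hmid.env.live (IsFloor.of_eq hcur.base.base.lt hG'.symm) off 1 hoff (Nat.le_refl _) rfl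
  have hasG : Lay.Has (addr G) 1596 := by
    apply has_addr
    · omega
    · unfold Layout.lo
      omega
    · rw [hLay]
      omega
  have w_rbx := hrbx
  have w_rbp := hrbp
  have w_eq : Mem.EqOn Vorbis.L.textLo Vorbis.L.textHi u₀.mem v.mem := hfr.code
  have hdf : v.flags .df = false := (show abiInv _ from hfr.inv).1
  have hmx : v.mxcsr &&& 0x1F80 = 0x1F80 := (show abiInv _ from hfr.inv).2
  have hsse := Vorbis.sseOK_of_abiInv hfr.inv
  have hnb := h_nb A.2 g.frames'
  -- 0x115842: `mov r12d, 2` (j = 2, line 4026)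
  u_walk hcode [hμ.vendor] until [Vorbis.L.start_decoder.loop26, Vorbis.L.start_decoder.cut189] span [Vorbis.L.textLo, Vorbis.L.textHi] side (v_side)
  -- THE LOOP HEAD 0x115848 (`loop26`; stb_vorbis_fixed.c:4026 `for (j=2; j < g->values; ++j)`): the counter is generalised, the exact
  -- memory replaced by the footprint `hsame`, the kept registers widened to everything the body and `neighbors` may write
  obtain ⟨j, hj, hj2, hjV, hnbs⟩ : ∃ j : Nat, s_115842.reg .r12 = UInt64.ofNat j ∧ 2 ≤ j ∧ j ≤ V ∧
      NbUpTo s_115842.mem G j := ⟨2, w_r12, Nat.le_refl _, hV2n.1, NbUpTo.two _ _⟩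
  have hsame : Mem.SameExcept [⟨(g.e.reg .rsp).toNat - 1480 - 128, (g.e.reg .rsp).toNat - 1480⟩,
      ⟨(g.e.reg .rsp).toNat - 1480 + 0x80, (g.e.reg .rsp).toNat - 1480 + 0x84⟩,
      ⟨(g.e.reg .rsp).toNat - 1480 + 0x90, (g.e.reg .rsp).toNat - 1480 + 0x94⟩,
      ⟨G + 0x444, G + 0x634⟩] v.mem s_115842.mem := by
    u_same
  have hun : ShadowUntouched v.mem s_115842.mem := by v_untouched
  have hdf' : s_115842.flags .df = false := by
    rw [w_flags]
    exact hdf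
  have w_rsp : s_115842.reg .rsp = g.e.reg .rsp - 1480 := by
    rw [w_kept.get .rsp rfl]
    exact hv_rsp
  have w_rbx : s_115842.reg .rbx = addr G := by
    rw [w_kept.get .rbx rfl]
    exact hrbx
  have w_rbp : s_115842.reg .rbp = addr g.f := by
    rw [w_kept.get .rbp rfl]
    exact hrbp
  have hmx' : s_115842.mxcsr &&& 0x1F80 = 0x1F80 := by
    rw [w_mxcsr]
    exact hmx
  replace w_kept := w_kept.mono_all (S' := [.rsp, .r12, .r13, .r14, .r15, .rax, .rcx, .rdx, .rsi, .rdi, .r8, .r9, .r10,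
    .r11, .r16, .r17, .r18, .r19, .r20, .r21, .r22, .r23, .r24, .r25, .r26, .r27, .r28, .r29, .r30, .r31]) (by rfl)
  clear w_mem w_flags w_r12 w_mxcsr
  u_loop [j] (fun s => V - (s.reg .r12).toNat)
  -- the loads of the head (0x115848 `values`, NO check) and of the exit (0x1158e0 `[rsp+0x28]`, 0x1158ea `[rsp+0x18]`), named: none of
  -- them is in a window of `hsame`
  have rV0 : v.mem.readLE (addr G + 1592) 4 = V := by
    rw [← hV]
    simp only [vfield]
  have rV : s_115842.mem.readLE (addr G + 1592) 4 = V := by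
    u_frame rV0
  have r180 : v.mem.readLE (g.e.reg .rsp - 1456) 4 = i := by
    rw [← hcnt]
    have e : g.e.reg .rsp - 1456 = addr (g.R + 24) := by
      apply UInt64.toNat_inj.mp
      unfold Ghost.R Ghost.RA steady
      rw [toNat_addr _ (by omega)]
      u_omega
    rw [e]
    rfl
  have r18 : s_115842.mem.readLE (g.e.reg .rsp - 1456) 4 = i := by
    u_frame r180
  have r280 : v.mem.readLE (g.e.reg .rsp - 1440) 4 = Lo := by
    rw [← hLo]
    have e : g.e.reg .rsp - 1440 = addr (g.R + 40) := by
      apply UInt64.toNat_inj.mp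
      unfold Ghost.R Ghost.RA steady
      rw [toNat_addr _ (by omega)]
      u_omega
    rw [e]
    rfl
  have r28 : s_115842.mem.readLE (g.e.reg .rsp - 1440) 4 = Lo := by
    u_frame r280
  -- the exit of the segment, for both arms of `if (g->values > longest_floorlist)`: `X` = the new longest_floorlist
  have hexit : ∀ (w : State) (X : Nat), (V : Int) ≤ (j : Int) → X ≤ 250 → Lo ≤ X → V ≤ X →
      w.mem = (s_115842.mem.writeLE (g.e.reg .rsp - 1456) 4 (BitVec.ofNat 32 i + 1#32).toNat).writeLE
        (g.e.reg .rsp - 1440) 4 (BitVec.ofNat 32 X).toNat →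
      w.rip = pc_F2 → w.reg .rsp = v.reg .rsp → w.reg .rbp = v.reg .rbp → abiInv w → AtF2 u₀ g (i + 1) w := by
    intro w X hjv hX250 hLoX hVX w_mem w_rip c_rsp c_rbp hinv
    have hi64 : i < 64 := by
      have h1 := hfloors.FL1.2
      have h2 := hcur.base.base.lt
      omega
    have hs' : Mem.SameExcept [⟨(g.e.reg .rsp).toNat - 1480 - 128, (g.e.reg .rsp).toNat - 1480⟩,
        ⟨(g.e.reg .rsp).toNat - 1480 + 0x18, (g.e.reg .rsp).toNat - 1480 + 0x1c⟩,
        ⟨(g.e.reg .rsp).toNat - 1480 + 0x28, (g.e.reg .rsp).toNat - 1480 + 0x2c⟩,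
        ⟨(g.e.reg .rsp).toNat - 1480 + 0x80, (g.e.reg .rsp).toNat - 1480 + 0x84⟩,
        ⟨(g.e.reg .rsp).toNat - 1480 + 0x90, (g.e.reg .rsp).toNat - 1480 + 0x94⟩,
        ⟨G + 0x444, G + 0x634⟩] v.mem w.mem := by
      u_same
    have hw' : ∀ x, x ∈ [(⟨(g.e.reg .rsp).toNat - 1480 - 128, (g.e.reg .rsp).toNat - 1480⟩ : Span),
        ⟨(g.e.reg .rsp).toNat - 1480 + 0x18, (g.e.reg .rsp).toNat - 1480 + 0x1c⟩,
        ⟨(g.e.reg .rsp).toNat - 1480 + 0x28, (g.e.reg .rsp).toNat - 1480 + 0x2c⟩,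
        ⟨(g.e.reg .rsp).toNat - 1480 + 0x80, (g.e.reg .rsp).toNat - 1480 + 0x84⟩,
        ⟨(g.e.reg .rsp).toNat - 1480 + 0x90, (g.e.reg .rsp).toNat - 1480 + 0x94⟩,
        ⟨G + 0x444, G + 0x634⟩] → Vorbis.Spec.start_decoder_F7.Win g.RA g.R G x := by
      intro x hx
      simp only [List.mem_cons, List.mem_nil_iff, or_false] at hx
      unfold Vorbis.Spec.start_decoder_F7.Win Ghost.R Ghost.RA steady
      rcases hx with rfl | rfl | rfl | rfl | rfl | rfl <;> simp only [] <;> omega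
    have hk := Vorbis.Spec.start_decoder_F7.keep_of hb0 hG hs' hw'
    have hun' : ShadowUntouched v.mem w.mem := by v_untouched
    have hnb' : NbUpTo w.mem G j := by
      have hs2 : Mem.SameExcept [⟨(g.e.reg .rsp).toNat - 1480 + 0x18, (g.e.reg .rsp).toNat - 1480 + 0x1c⟩,
          ⟨(g.e.reg .rsp).toNat - 1480 + 0x28, (g.e.reg .rsp).toNat - 1480 + 0x2c⟩] s_115842.mem w.mem := by
        u_same
      apply Vorbis.Spec.start_decoder_F7.nb_off hs2 ?_ (by omega) hnbs (by omega)
      intro x hx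
      simp only [List.mem_cons, List.mem_nil_iff, or_false] at hx
      rcases hx with rfl | rfl <;> simp only [] <;> omega
    have e18 : g.e.reg .rsp - 1456 = addr (g.R + 0x18) := by
      apply UInt64.toNat_inj.mp
      unfold Ghost.R Ghost.RA steady
      rw [toNat_addr _ (by omega)]
      u_omega
    have e28 : g.e.reg .rsp - 1440 = addr (g.R + 0x28) := by
      apply UInt64.toNat_inj.mp
      unfold Ghost.R Ghost.RA steady
      rw [toNat_addr _ (by omega)]
      u_omega
    have hcnt' : w.mem.u32 (g.R + 0x18) = i + 1 := by
      unfold Mem.u32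
      rw [← e18, ← Vorbis.Spec.start_decoder_F7.ofNat32_succ_toNat i (by omega), w_mem]
      u_read
    have hLw : w.mem.u32 (g.R + 0x28) = X := by
      unfold Mem.u32
      rw [← e28, w_mem, Vorbis.Spec.start_decoder_F7.ofNat32_toNat X (by omega)]
      u_read
    have hLi : w.mem.i32 (g.R + 0x28) = (X : Int) := by
      have e : w.mem.i32 (g.R + 0x28) = sint32 (w.mem.u32 (g.R + 0x28)) := rfl
      rw [e, hLw]
      have hc := sint32_cases X
      omega
    refine ⟨A5, A, Vorbis.Spec.start_decoder_F7.exit_body hb0 hG hk hun' hnb' ?_ w_rip ?_ ?_ hinv hcnt' ?_ ?_ ?_⟩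
    · rw [hV2i]
      exact hjv
    · rw [c_rsp]
      exact hfr.rsp
    · rw [c_rbp]
      exact hrbp
    · rw [hLi, hLo2i]
      omega
    · rw [hLi, hV2i]
      omega
    · rw [hLi]
      omega
  clear rV0 r180 r280
  -- 0x11589b `movsxd r13, r12d` of the small counter, as a number (for the address arithmetic of the two byte stores)
  have hsx : (Word.ofBV (BitVec.signExtend 64 (Word.part .w32 (UInt64.ofNat j)))).toNat = j := by
    have e : (Word.part .w32 (UInt64.ofNat j)).toNat = j := by
      rw [Vorbis.toNat_part32]
      u_omega
    rw [toNat_sext32 _ (by omega), e]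
  -- THE BODY, walked from the head: 0x115848 … the call 0x11588e on one arm, the exit 0x1158e0 … 0x1158f3 (two arms) on the other
  u_walk hcode [hμ.vendor] until [Vorbis.L.start_decoder.loop26, Vorbis.L.start_decoder.cut189] span [Vorbis.L.textLo, Vorbis.L.textHi] side (v_side)
  case call_inv => v_inv
  case pre_11588e =>
    -- 0x11588e (line 4028): the precondition of `neighbors(g->Xlist, j, &low, &hi)`
    have hun' : ShadowUntouched v.mem s_11588e.mem := by v_untouched
    have hrsi : (s_11588e.reg .rsi).toNat = j := by
      rw [w_rsi, Vorbis.toNat_ofBV32, Vorbis.toNat_part32]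
      u_omega
    have hjs : s32 (s_11588e.reg .rsi) = (j : Int) := by
      show (Word.part .w32 (s_11588e.reg .rsi)).toInt = (j : Int)
      rw [part32_toInt, hrsi]
      have hc := sint32_cases (j % 2 ^ 32)
      omega
    have ersp : (s_11588e.reg .rsp).toNat + 8 = g.R := by
      rw [w_rsp]
      unfold Ghost.R Ghost.RA steady
      u_omega
    have erdi : (s_11588e.reg .rdi).toNat = G + 338 := by
      rw [w_rdi]
      u_omega
    have erdx : (s_11588e.reg .rdx).toNat = g.R + 0x80 := by
      rw [w_rdx]
      unfold Ghost.R Ghost.RA steady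
      u_omega
    have ercx : (s_11588e.reg .rcx).toNat = g.R + 0x90 := by
      rw [w_rcx]
      unfold Ghost.R Ghost.RA steady
      u_omega
    have hRn : g.R = (g.e.reg .rsp).toNat - 1480 := rfl
    -- (contracts 2: `0 < n`, no case `n ≤ 0` any more; `n = j`, and `2 ≤ j` is the loop invariant's `hj2`)
    refine ⟨⟨?_, hfr.offText⟩, ?_, ?_⟩
    · rw [ersp]
      exact hfr.shadow.untouched hun'
    · -- `0 < n`
      rw [hjs]
      omega
    · rw [hjs, erdi, erdx, ercx, Int.toNat_natCast]
      refine ⟨?_, Vorbis.Spec.start_decoder_F7.low_live g A.2, Vorbis.Spec.start_decoder_F7.hi_live g A.2, ?_, ?_, ?_⟩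
      · exact (Vorbis.Spec.start_decoder_F7.floor_live hmid.arena hfloors.toFloorShape).sub _ _ (by omega) (by omega)
      · omega
      · omega
      · omega
  · -- 0x1158e0 … 0x1158f3 (lines 4033, 3966), the arm `values > longest_floorlist` (`jg` taken): the new slot value is `values`
    refine ReachVia.done (Or.inl ?_)
    have hjv : (V : Int) ≤ (j : Int) := by
      rw [Vorbis.Spec.start_decoder_F7.ofNat32_toInt V (by omega), part32_toInt] at hbr_115851
      have e : (UInt64.ofNat j).toNat % 2 ^ 32 = j := by u_omega
      rw [e] at hbr_115851
      have hc := sint32_cases j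
      omega
    have hLV : Lo < V := by
      rw [Vorbis.Spec.start_decoder_F7.ofNat32_toInt V (by omega), Vorbis.Spec.start_decoder_F7.ofNat32_toInt Lo (by omega)]
        at hbr_1158e6
      omega
    refine hexit s_1158f3 V hjv hV2n.2 (by omega) (Nat.le_refl _) w_mem w_rip (w_rsp.trans hv_rsp.symm) (w_kept.get .rbp rfl) ⟨?_, ?_⟩
    · rw [w_flags]
      simp only [X86.User.df_setStatus]
      exact hdf'
    · rw [w_mxcsr]
      exact hmx'
  · -- 0x1158e0 … 0x1158f3, the arm `values ≤ longest_floorlist` (`mov eax, edx`): the slot keeps its value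
    refine ReachVia.done (Or.inl ?_)
    have hjv : (V : Int) ≤ (j : Int) := by
      rw [Vorbis.Spec.start_decoder_F7.ofNat32_toInt V (by omega), part32_toInt] at hbr_115851
      have e : (UInt64.ofNat j).toNat % 2 ^ 32 = j := by u_omega
      rw [e] at hbr_115851
      have hc := sint32_cases j
      omega
    have hLV : V ≤ Lo := by
      rw [Vorbis.Spec.start_decoder_F7.ofNat32_toInt V (by omega), Vorbis.Spec.start_decoder_F7.ofNat32_toInt Lo (by omega)]
        at hbr_1158e6
      omega
    refine hexit s_1158f3 Lo hjv hLon (Nat.le_refl _) hLV w_mem w_rip (w_rsp.trans hv_rsp.symm) (w_kept.get .rbp rfl) ⟨?_, ?_⟩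
    · rw [w_flags]
      simp only [X86.User.df_setStatus]
      exact hdf'
    · rw [w_mxcsr]
      exact hmx'
  · -- 0x115893 (`cut229`, lines 4029 – 4030): after `neighbors` returned; THE RECIPE for reading through its footprint
    v_after_call w_rsp_11588e w_mem_11588e
    simp only [w_rdx_11588e, w_rcx_11588e] at w_same
    have hpost := w_post
    obtain ⟨hpun, hplow, hplow0, hphi, hphi0⟩ := w_post
    clear hplow hplow0 hphi hphi0
    obtain ⟨low, hlow⟩ : ∃ low : Nat, s_11588er.mem.readLE (g.e.reg .rsp - 1352) 4 = low := ⟨_, rfl⟩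
    obtain ⟨hi, hhi⟩ : ∃ hi : Nat, s_11588er.mem.readLE (g.e.reg .rsp - 1336) 4 = hi := ⟨_, rfl⟩
    -- FL10 so far, over the callee's footprint (off the element)
    have hsy0 : Mem.SameExcept [⟨(g.e.reg .rsp).toNat - 1480 - 128, (g.e.reg .rsp).toNat - 1480⟩,
        ⟨(g.e.reg .rsp).toNat - 1480 + 0x80, (g.e.reg .rsp).toNat - 1480 + 0x84⟩,
        ⟨(g.e.reg .rsp).toNat - 1480 + 0x90, (g.e.reg .rsp).toNat - 1480 + 0x94⟩] s_115842.mem s_11588er.mem := by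
      u_same
    have hnbr : NbUpTo s_11588er.mem G j := by
      apply Vorbis.Spec.start_decoder_F7.nb_off hsy0 ?_ (by omega) hnbs (by omega)
      intro x hx
      simp only [List.mem_cons, List.mem_nil_iff, or_false] at hx
      rcases hx with rfl | rfl | rfl <;> simp only [] <;> omega
    clear hsy0
    have hsamer : Mem.SameExcept [⟨(g.e.reg .rsp).toNat - 1480 - 128, (g.e.reg .rsp).toNat - 1480⟩,
        ⟨(g.e.reg .rsp).toNat - 1480 + 0x80, (g.e.reg .rsp).toNat - 1480 + 0x84⟩,
        ⟨(g.e.reg .rsp).toNat - 1480 + 0x90, (g.e.reg .rsp).toNat - 1480 + 0x94⟩,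
        ⟨G + 0x444, G + 0x634⟩] v.mem s_11588er.mem := by
      u_same
    have hunr : ShadowUntouched v.mem s_11588er.mem := by v_untouched
    u_walk hcode [hμ.vendor] until [Vorbis.L.start_decoder.loop26, Vorbis.L.start_decoder.cut189] span [Vorbis.L.textLo, Vorbis.L.textHi] side (v_side)
    · -- 0x1158ac, store1 `g->neighbors[j][0]`
      have hun2 : ShadowUntouched v.mem s_1158ac.mem := by v_untouched
      exact Vorbis.Spec.check_site hfr.shadow hun2 (hsite (1088 + 2 * j) (by omega)) (by u_omega)
    · -- 0x1158ca, store1 `g->neighbors[j][1]`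
      have hun2 : ShadowUntouched v.mem s_1158ca.mem := by v_untouched
      exact Vorbis.Spec.check_site hfr.shadow hun2 (hsite (1088 + 2 * j + 1) (by omega)) (by u_omega)
    · -- the back edge 0x1158db → 0x115848
      have hjlt : j < V := by
        rw [Vorbis.Spec.start_decoder_F7.ofNat32_toInt V (by omega), part32_toInt] at hbr_115851
        have e : (UInt64.ofNat j).toNat % 2 ^ 32 = j := by u_omega
        rw [e] at hbr_115851
        have hc := sint32_cases j
        omega
      u_loop_back [j + 1]
      · -- r12d = j + 1
        rw [w_r12]
        exact Vorbis.Spec.start_decoder_F7.incr12d j (by omega)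
      · omega
      · omega
      · -- FL10 for `j`: the post of `neighbors`, XL, the two bytes stored
        have hse : Mem.SameExcept [⟨(g.e.reg .rsp).toNat - 1480 - 128, (g.e.reg .rsp).toNat - 1480⟩,
            ⟨(g.e.reg .rsp).toNat - 1480 + 0x80, (g.e.reg .rsp).toNat - 1480 + 0x84⟩,
            ⟨(g.e.reg .rsp).toNat - 1480 + 0x90, (g.e.reg .rsp).toNat - 1480 + 0x94⟩,
            ⟨G + 0x444, G + 0x634⟩] v.mem s_11588e.mem := by
          u_same
        have hsf : Mem.SameExcept [⟨(g.e.reg .rsp).toNat - 1480 - 128, (g.e.reg .rsp).toNat - 1480⟩,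
            ⟨(g.e.reg .rsp).toNat - 1480 + 0x80, (g.e.reg .rsp).toNat - 1480 + 0x84⟩,
            ⟨(g.e.reg .rsp).toNat - 1480 + 0x90, (g.e.reg .rsp).toNat - 1480 + 0x94⟩,
            ⟨G + 0x444, G + 0x634⟩] v.mem s_1158db.mem := by
          u_same
        have hw4 : ∀ x, x ∈ [(⟨(g.e.reg .rsp).toNat - 1480 - 128, (g.e.reg .rsp).toNat - 1480⟩ : Span),
            ⟨(g.e.reg .rsp).toNat - 1480 + 0x80, (g.e.reg .rsp).toNat - 1480 + 0x84⟩,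
            ⟨(g.e.reg .rsp).toNat - 1480 + 0x90, (g.e.reg .rsp).toNat - 1480 + 0x94⟩,
            ⟨G + 0x444, G + 0x634⟩] → Vorbis.Spec.start_decoder_F7.Win g.RA g.R G x := by
          intro x hx
          simp only [List.mem_cons, List.mem_nil_iff, or_false] at hx
          unfold Vorbis.Spec.start_decoder_F7.Win Ghost.R Ghost.RA steady
          rcases hx with rfl | rfl | rfl | rfl <;> simp only [] <;> omega
        have Ke := Vorbis.Spec.start_decoder_F7.keep_of hb0 hG hse hw4
        have Kf := Vorbis.Spec.start_decoder_F7.keep_of hb0 hG hsf hw4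
        have hsy : Mem.SameExcept [⟨(g.e.reg .rsp).toNat - 1480 - 128, (g.e.reg .rsp).toNat - 1480⟩,
            ⟨G + 1088 + 2 * j, G + 1088 + 2 * j + 2⟩] s_11588er.mem s_1158db.mem := by
          u_same
        have hnbj : NbUpTo s_1158db.mem G j := by
          apply Vorbis.Spec.start_decoder_F7.nb_young hsy ?_ (by omega) hnbr (by omega)
          intro x hx
          simp only [List.mem_cons, List.mem_nil_iff, or_false] at hx
          rcases hx with rfl | rfl <;> simp only [] <;> omega
        -- the callee's entry state: `esi = j`, `rdi = g->Xlist`, `low = hi = 0`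
        have hrsi : (s_11588e.reg .rsi).toNat = j := by
          rw [w_rsi_11588e, Vorbis.toNat_ofBV32, Vorbis.toNat_part32]
          u_omega
        have hjs : s32 (s_11588e.reg .rsi) = (j : Int) := by
          show (Word.part .w32 (s_11588e.reg .rsi)).toInt = (j : Int)
          rw [part32_toInt, hrsi]
          have hc := sint32_cases (j % 2 ^ 32)
          omega
        have erdi : (s_11588e.reg .rdi).toNat = G + 338 := by
          rw [w_rdi_11588e]
          u_omega
        have elow : s_11588er.mem.u32 (s_11588e.reg .rdx).toNat = low := by
          unfold Mem.u32
          rw [addr_toNat, w_rdx_11588e]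
          exact hlow
        have ehi : s_11588er.mem.u32 (s_11588e.reg .rcx).toNat = hi := by
          unfold Mem.u32
          rw [addr_toNat, w_rcx_11588e]
          exact hhi
        have e0 : s_11588e.mem.u32 (s_11588e.reg .rdx).toNat = 0 := by
          unfold Mem.u32
          rw [addr_toNat, w_rdx_11588e, w_mem_11588e]
          u_read
        obtain ⟨c1, c2, c3⟩ := Vorbis.Spec.start_decoder_F7.post_conv hjs erdi elow ehi e0 hpost
        apply Vorbis.Spec.start_decoder_F7.nb_step hb0 hG Ke Kf hj2 (by rw [hV2i]; omega) c1 c2 c3 ?_ ?_ hnbj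
        · -- the byte `neighbors[j][0]`
          simp only [vacc, voff]
          unfold Mem.u8
          have ea : addr (G + 1088 + (2 * j + 0)) =
              addr G + (Word.ofBV (BitVec.signExtend 64 (Word.part .w32 (UInt64.ofNat j))) + 544) * 2 := by
            apply UInt64.toNat_inj.mp
            rw [toNat_addr _ (by omega)]
            u_omega
          rw [ea, w_mem, ← Vorbis.Spec.start_decoder_F7.trunc8]
          u_read
        · -- the byte `neighbors[j][1]`
          simp only [vacc, voff]
          unfold Mem.u8
          have ea : addr (G + 1088 + (2 * j + 1)) =
              addr G + Word.ofBV (BitVec.signExtend 64 (Word.part .w32 (UInt64.ofNat j))) * 2 + 1089 := by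
            apply UInt64.toNat_inj.mp
            rw [toNat_addr _ (by omega)]
            u_omega
          rw [ea, w_mem, ← Vorbis.Spec.start_decoder_F7.trunc8]
          u_read
      · v_untouched
      · rw [w_flags]
        simp only [X86.User.df_setStatus]
        exact w_df_1158ca
      · rw [w_kept.get .rbx rfl]
        exact hrbx
      · rw [w_kept.get .rbp rfl]
        exact hrbp
      · rw [w_mxcsr]
        exact w_mx
      · rw [w_r12, Vorbis.Spec.start_decoder_F7.incr12d j (by omega)]
        u_omega
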